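-- pv_equiv track=rewrite | github.com/Beomi/typora-s3-uploader | upload.py | get_filepaths
-- ===== SOURCE A (Python) =====
-- def get_filepaths(args):
--     filepaths = []
--     args.pop(0)  # Remove `upload.py` filename
--     for i in args:
--         filepaths.append(i)
--         if i == None:
--             break
--     return filepaths
-- ===== SOURCE B (Python) =====
-- def get_filepaths(args):
--     # Like A, mutates: removes the script name in place; IndexError on empty args.
--     args.pop(0)
--     if None in args:
--         return args[:args.index(None) + 1]
--     return args[:]
-- ===== Notes on version B (the rewrite author's own statement) =====
-- stated objective: simpler
-- what changed: Replaces the append-and-break accumulator loop with a find-then-slice: locate the first None and return the prefix through it (or a copy of the whole list).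
import Mathlib
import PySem

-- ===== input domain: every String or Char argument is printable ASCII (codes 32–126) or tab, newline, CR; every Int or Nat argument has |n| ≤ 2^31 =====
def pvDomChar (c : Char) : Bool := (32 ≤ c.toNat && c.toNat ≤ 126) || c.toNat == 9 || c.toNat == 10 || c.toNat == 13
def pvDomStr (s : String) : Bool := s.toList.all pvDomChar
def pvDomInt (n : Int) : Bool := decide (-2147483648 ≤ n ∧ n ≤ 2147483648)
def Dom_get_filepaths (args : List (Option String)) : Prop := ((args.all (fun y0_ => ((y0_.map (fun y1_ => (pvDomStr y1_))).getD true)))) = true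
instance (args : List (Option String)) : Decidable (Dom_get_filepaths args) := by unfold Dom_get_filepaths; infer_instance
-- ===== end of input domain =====

-- B replaces A's append-and-break accumulator loop with find-first-None-then-slice (simpler
-- decomposition); like A, the Python B pops args[0] in place — the proof is about the return value.


-- ===== PORT A =====
-- the for-loop: append each element, break right after appending a None
def gfLoop : List (Option String) → List (Option String)
  | [] => []
  | i :: rest => if i = none then [i] else i :: gfLoop rest

def get_filepaths (args : List (Option String)) : List (Option String) :=
  match args with
  | [] => []            -- Python raises IndexError here (args.pop(0)); excluded by Pre_
  | _ :: rest => gfLoop rest   -- args.pop(0) removed the head; loop over the remainder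

-- ===== PORT B =====
def get_filepaths_alt (args : List (Option String)) : List (Option String) :=
  let rest := args.tail        -- args.pop(0); Python raises on [] (excluded by Pre_)
  if rest.contains none then
    rest.take (((PySem.List.index? rest none).getD 0) + 1)   -- args[:args.index(None)+1]
  else
    rest                        -- args[:]

-- ===== PRECONDITION & SPEC =====
-- Pre_ excludes only the empty list, on which A's args.pop(0) raises IndexError.
def Pre_get_filepaths (args : List (Option String)) : Prop := args ≠ []
instance (args : List (Option String)) : Decidable (Pre_get_filepaths args) := by unfold Pre_get_filepaths; infer_instance
def pvWitness_get_filepaths : List (Option String) := [some "upload.py", some "a.png"]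
def Spec_get_filepaths (args : List (Option String)) (out : List (Option String)) : Prop := out = get_filepaths_alt args
instance (args : List (Option String)) (out : List (Option String)) : Decidable (Spec_get_filepaths args out) := by unfold Spec_get_filepaths; infer_instance

-- ===== CLAIM (what is proved, stated in full; the proofs are below) =====
def Claim_equal_get_filepaths : Prop := ∀ (args : List (Option String)), Dom_get_filepaths args → Pre_get_filepaths args → Spec_get_filepaths args (get_filepaths args)

-- ===== LEMMAS AND PROOFS =====
theorem gfLoop_eq (l : List (Option String)) :
    gfLoop l = if l.contains none then l.take (((PySem.List.index? l none).getD 0) + 1) else l := by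
  induction l with
  | nil => simp [gfLoop]
  | cons i rest ih =>
    by_cases hi : i = none
    · subst hi; simp [gfLoop, PySem.List.index?, List.idxOf?, List.findIdx?_cons]
    · have hidx : PySem.List.index? (i :: rest) none = (PySem.List.index? rest none).map (· + 1) := by
        simp [PySem.List.index?, List.idxOf?, List.findIdx?_cons]; exact hi
      have hcont : (i :: rest).contains (none : Option String) = rest.contains none := by
        simp only [List.contains_eq_mem, decide_eq_decide, List.mem_cons]
        constructor
        · rintro (h | h)
          · exact absurd h.symm hi
          · exact h
        · exact Or.inr
      simp only [gfLoop, if_neg hi, hcont, hidx, ih]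
      by_cases hc : rest.contains (none : Option String)
      · have hs : (PySem.List.index? rest none).isSome := by
          simp only [PySem.List.index?, List.isSome_idxOf?]; simpa using hc
        obtain ⟨n, hn⟩ := Option.isSome_iff_exists.mp hs
        have hm : (none : Option String) ∈ rest := by simpa using hc
        simp [hm, show List.idxOf? none rest = some n from hn, List.take_succ_cons]
      · have hm : (none : Option String) ∉ rest := by simpa using hc
        simp [hm]

-- ===== VERDICT (by name: the statement is the Claim_ definition above) =====
theorem get_filepaths_spec : Claim_equal_get_filepaths := by
  intro args _ hpre
  unfold Spec_get_filepaths get_filepaths get_filepaths_alt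
  cases args with
  | nil => exact absurd rfl hpre
  | cons h rest => simpa using gfLoop_eq rest
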